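-- pv_equiv track=rewrite | github.com/CAM-Initiative/Caelestis | .github/scripts/lint_amendment_ledger.py | replace_last_table_cell
-- ===== SOURCE A (Python) =====
-- def replace_last_table_cell(line: str, value: str) -> str:
--     pipe_positions = [idx for idx, ch in enumerate(line) if ch == "|"]
--     if len(pipe_positions) < 3:
--         return line
--
--     penultimate = pipe_positions[-2]
--     last = pipe_positions[-1]
--     cell = line[penultimate + 1:last]
--     leading_ws_len = len(cell) - len(cell.lstrip(" "))
--     trailing_ws_len = len(cell) - len(cell.rstrip(" "))
--     leading_ws = cell[:leading_ws_len]
--     trailing_ws = cell[len(cell) - trailing_ws_len:] if trailing_ws_len > 0 else ""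
--     return f"{line[:penultimate + 1]}{leading_ws}{value}{trailing_ws}{line[last:]}"
-- ===== SOURCE B (Python) =====
-- def replace_last_table_cell(line: str, value: str) -> str:
--     parts = line.split("|")
--     if len(parts) < 4:
--         return line
--     cell = parts[-2]
--     leading = cell[:len(cell) - len(cell.lstrip(" "))]
--     trailing = cell[len(cell.rstrip(" ")):]
--     parts[-2] = leading + value + trailing
--     return "|".join(parts)
-- ===== Notes on version B (the rewrite author's own statement) =====
-- stated objective: simpler
-- what changed: B splits the line into its '|'-separated fields and rejoins them after replacing the second-to-last field, instead of A's index scan for pipe positions followed by offset slicing.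
import Mathlib
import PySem

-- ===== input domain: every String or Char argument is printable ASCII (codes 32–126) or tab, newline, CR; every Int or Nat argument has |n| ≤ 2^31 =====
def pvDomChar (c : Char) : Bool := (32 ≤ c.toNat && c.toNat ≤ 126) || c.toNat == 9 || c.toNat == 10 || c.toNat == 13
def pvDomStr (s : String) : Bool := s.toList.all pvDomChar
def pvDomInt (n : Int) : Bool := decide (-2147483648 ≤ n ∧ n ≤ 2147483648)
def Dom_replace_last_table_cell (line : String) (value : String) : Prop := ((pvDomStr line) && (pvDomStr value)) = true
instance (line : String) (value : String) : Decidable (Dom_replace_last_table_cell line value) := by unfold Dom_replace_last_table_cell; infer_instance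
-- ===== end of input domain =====

-- B replaces A's pipe-position index scanning by field-splitting on '|' and rejoining (simpler decomposition); same return value on every input.


-- ===== PORT A =====
-- cell.lstrip(" ") / cell.rstrip(" ") strip SPACES only, so they are ported by hand
-- (dropWhile (· == ' '), resp. via reverse) — exact, PySem's lstrip/rstrip strip all whitespace.
def replace_last_table_cell (line : String) (value : String) : String :=
  let cs := line.toList
  let pipe_positions : List Int :=
    ((PySem.List.enumerate cs 0).filter (fun p => p.2 == '|')).map (fun p => p.1)
  if pipe_positions.length < 3 then line
  else
    -- pipe_positions[-2] / [-1]: the guard ensures ≥ 3 positions, so pyGet? is always `some`; getD totalizes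
    let penultimate := (PySem.List.pyGet? pipe_positions (-2)).getD 0
    let last := (PySem.List.pyGet? pipe_positions (-1)).getD 0
    let cell := PySem.List.slice cs (some (penultimate + 1)) (some last)
    let leading_ws_len : Int := (cell.length : Int) - ((cell.dropWhile (fun c => c == ' ')).length : Int)
    let trailing_ws_len : Int := (cell.length : Int) - (((cell.reverse.dropWhile (fun c => c == ' ')).reverse).length : Int)
    let leading_ws := PySem.List.slice cell none (some leading_ws_len)
    let trailing_ws := if trailing_ws_len > 0 then PySem.List.slice cell (some ((cell.length : Int) - trailing_ws_len)) none else []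
    String.ofList (PySem.List.slice cs none (some (penultimate + 1)) ++ leading_ws ++ value.toList ++ trailing_ws ++ PySem.List.slice cs (some last) none)

-- ===== PORT B =====
def replace_last_table_cell_alt (line : String) (value : String) : String :=
  let parts := PySem.Chars.splitOn line.toList ['|']
  if parts.length < 4 then line
  else
    -- parts[-2]: the guard ensures ≥ 4 parts, so pyGet? is always `some`; getD totalizes
    let cell := (PySem.List.pyGet? parts (-2)).getD []
    let leading := cell.take (cell.length - (cell.dropWhile (fun c => c == ' ')).length)
    let trailing := cell.drop ((cell.reverse.dropWhile (fun c => c == ' ')).reverse.length)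
    String.ofList (PySem.Chars.join ['|'] (parts.set (parts.length - 2) (leading ++ value.toList ++ trailing)))

-- ===== PRECONDITION & SPEC =====
def Spec_replace_last_table_cell (line : String) (value : String) (out : String) : Prop := out = replace_last_table_cell_alt line value
instance (line : String) (value : String) (out : String) : Decidable (Spec_replace_last_table_cell line value out) := by unfold Spec_replace_last_table_cell; infer_instance

-- ===== CLAIM (what is proved, stated in full; the proofs are below) =====
def Claim_equal_replace_last_table_cell : Prop := ∀ (line : String) (value : String), Dom_replace_last_table_cell line value → Spec_replace_last_table_cell line value (replace_last_table_cell line value)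

-- ===== LEMMAS AND PROOFS =====

-- splitOn.go without its fuel: accumulate the current (reversed) piece, cut at each '|'.
def pvConsume (cur : List Char) : List Char → List (List Char)
  | [] => [cur.reverse]
  | c :: r => if c = '|' then cur.reverse :: pvConsume [] r else pvConsume (c :: cur) r

theorem pvGo_eq_consume (fuel : Nat) (l cur : List Char) (acc : List (List Char))
    (h : l.length ≤ fuel) :
    PySem.Chars.splitOn.go ['|'] fuel l cur acc = acc.reverse ++ pvConsume cur l := by
  induction fuel generalizing l cur acc with
  | zero =>
    have hl : l = [] := by cases l <;> simp_all
    subst hl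
    rw [PySem.Chars.splitOn.go.eq_def]
    simp [pvConsume]
  | succ fuel ih =>
    cases l with
    | nil => rw [PySem.Chars.splitOn.go.eq_def]; simp [pvConsume]
    | cons ch r =>
      rw [PySem.Chars.splitOn.go.eq_def]
      simp only [List.isPrefixOf, List.isPrefixOf_nil_left, Bool.and_true, List.drop_succ_cons,
        List.drop_nil, List.drop_zero]
      by_cases hc : ch = '|'
      · subst hc
        simp only [beq_self_eq_true, if_pos]
        rw [ih _ _ _ (by simp at h ⊢; omega)]
        simp [pvConsume]
      · rw [if_neg (by simp [Ne.symm hc]), ih _ _ _ (by simp at h ⊢; omega)]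
        simp [pvConsume, hc]

theorem pvSplitOn_eq_consume (l : List Char) :
    PySem.Chars.splitOn l ['|'] = pvConsume [] l := by
  show PySem.Chars.splitOn.go ['|'] (l.length + 1) l [] [] = _
  rw [pvGo_eq_consume _ _ _ _ (by omega)]
  simp

theorem pvLength_consume (l cur : List Char) :
    (pvConsume cur l).length = l.count '|' + 1 := by
  induction l generalizing cur with
  | nil => simp [pvConsume]
  | cons ch r ih =>
    by_cases hc : ch = '|'
    · subst hc; simp [pvConsume, ih, List.count_cons]
    · simp [pvConsume, hc, ih, List.count_cons]

theorem pvJoin_consume (l cur : List Char) :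
    PySem.Chars.join ['|'] (pvConsume cur l) = cur.reverse ++ l := by
  induction l generalizing cur with
  | nil => simp [pvConsume, PySem.Chars.join_singleton]
  | cons ch r ih =>
    by_cases hc : ch = '|'
    · subst hc
      simp only [pvConsume, if_pos]
      obtain ⟨q, rest, hq⟩ : ∃ q rest, pvConsume ([] : List Char) r = q :: rest := by
        cases hqr : pvConsume ([] : List Char) r with
        | nil => have := pvLength_consume r []; rw [hqr] at this; simp at this
        | cons q rest => exact ⟨q, rest, rfl⟩
      rw [hq, PySem.Chars.join_cons_cons, ← hq, ih]
      simp
    · simp only [pvConsume, hc, if_neg, ite_false]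
      rw [ih]
      simp

theorem pvConsume_nopipe_append (a : List Char) (ha : '|' ∉ a) (cur r : List Char) :
    pvConsume cur (a ++ r) = pvConsume (a.reverse ++ cur) r := by
  induction a generalizing cur with
  | nil => simp
  | cons a0 a' ih =>
    have h0 : a0 ≠ '|' := by intro h; exact ha (h ▸ List.mem_cons_self)
    simp only [List.cons_append, pvConsume, h0, ite_false]
    rw [ih (fun h => ha (List.mem_cons_of_mem _ h))]
    simp

theorem pvConsume_ends (c t : List Char) (hc : '|' ∉ c) (ht : '|' ∉ t)
    (x cur : List Char) :
    ∃ ps : List (List Char), pvConsume cur (x ++ '|' :: (c ++ '|' :: t)) = ps ++ [c, t] ∧ ps ≠ [] := by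
  induction x generalizing cur with
  | nil =>
    refine ⟨[cur.reverse], ?_, by simp⟩
    simp only [List.nil_append, pvConsume, if_pos]
    rw [pvConsume_nopipe_append c hc]
    simp only [pvConsume, if_pos, List.append_nil]
    rw [show (t : List Char) = t ++ [] by simp, pvConsume_nopipe_append t ht]
    simp [pvConsume]
  | cons x0 x' ih =>
    by_cases h0 : x0 = '|'
    · subst h0
      obtain ⟨ps, hps, _⟩ := ih ([] : List Char)
      exact ⟨cur.reverse :: ps, by simp [pvConsume, hps], by simp⟩
    · obtain ⟨ps, hps, hne⟩ := ih (x0 :: cur)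
      exact ⟨ps, by simp [pvConsume, h0, hps], hne⟩

-- the pipe-position comprehension of A, with an arbitrary enumeration start
def pvPipes (l : List Char) (s : Int) : List Int :=
  ((PySem.List.enumerate l s).filter (fun p => p.2 == '|')).map (fun p => p.1)

theorem pvPipes_nil (s : Int) : pvPipes [] s = [] := by
  simp [pvPipes, PySem.List.enumerate_nil]

theorem pvPipes_cons (x : Char) (l : List Char) (s : Int) :
    pvPipes (x :: l) s = (if x = '|' then [s] else []) ++ pvPipes l (s + 1) := by
  by_cases hx : x = '|' <;> simp [pvPipes, PySem.List.enumerate_cons, hx]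

theorem pvPipes_append (xs ys : List Char) (s : Int) :
    pvPipes (xs ++ ys) s = pvPipes xs s ++ pvPipes ys (s + xs.length) := by
  simp [pvPipes, PySem.List.enumerate_append, List.filter_append]

theorem pvPipes_nopipe (l : List Char) (h : '|' ∉ l) (s : Int) : pvPipes l s = [] := by
  induction l generalizing s with
  | nil => exact pvPipes_nil s
  | cons x r ih =>
    rw [pvPipes_cons, ih (fun hm => h (List.mem_cons_of_mem _ hm))]
    have hx : x ≠ '|' := by intro hx; exact h (hx ▸ List.mem_cons_self)
    simp [hx]

theorem pvLength_pipes (l : List Char) (s : Int) : (pvPipes l s).length = l.count '|' := by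
  induction l generalizing s with
  | nil => simp [pvPipes_nil]
  | cons x r ih =>
    rw [pvPipes_cons]
    by_cases hx : x = '|' <;> simp [hx, ih, List.count_cons] <;> omega

theorem pvExists_last_pipe (l : List Char) (h : '|' ∈ l) :
    ∃ a b, l = a ++ '|' :: b ∧ '|' ∉ b := by
  induction l with
  | nil => simp at h
  | cons x r ih =>
    by_cases hr : '|' ∈ r
    · obtain ⟨a, b, hab, hb⟩ := ih hr
      exact ⟨x :: a, b, by simp [hab], hb⟩
    · have hx : x = '|' := by
        rcases List.mem_cons.mp h with h' | h'
        · exact h'.symm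
        · exact absurd h' hr
      exact ⟨[], r, by simp [hx], hr⟩

theorem pvDecomp (l : List Char) (h : 3 ≤ l.count '|') :
    ∃ u c t, l = u ++ '|' :: (c ++ '|' :: t) ∧ '|' ∈ u ∧ '|' ∉ c ∧ '|' ∉ t := by
  have hmem : '|' ∈ l := List.count_pos_iff.mp (by omega)
  obtain ⟨a, b, hab, hb⟩ := pvExists_last_pipe l hmem
  have hca : 2 ≤ a.count '|' := by
    have : l.count '|' = a.count '|' + 1 := by
      rw [hab]; simp [List.count_append, List.count_cons, List.count_eq_zero.mpr hb]
    omega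
  obtain ⟨u, c, huc, hc⟩ := pvExists_last_pipe a (List.count_pos_iff.mp (by omega))
  have hu : '|' ∈ u := by
    have : a.count '|' = u.count '|' + 1 := by
      rw [huc]; simp [List.count_append, List.count_cons, List.count_eq_zero.mpr hc]
    exact List.count_pos_iff.mp (by omega)
  exact ⟨u, c, b, by simp [hab, huc], hu, hc, hb⟩

theorem pvPyGet_pair_neg_two {α : Type} (q : List α) (a b : α) :
    PySem.List.pyGet? (q ++ [a, b]) (-2) = some a := by
  have hlen : (q ++ [a, b]).length = q.length + 2 := by simp
  simp only [PySem.List.pyGet?, PySem.List.pyIdx?, hlen]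
  rw [if_neg (by omega), if_pos (by push_cast; omega)]
  have h2 : q.length + 2 - (-(-2 : Int)).toNat = q.length := by
    simp
  simp only [Option.bind, h2]
  rw [List.getElem?_append_right (by omega)]
  simp

theorem pvPyGet_pair_neg_one {α : Type} (q : List α) (a b : α) :
    PySem.List.pyGet? (q ++ [a, b]) (-1) = some b := by
  have hlen : (q ++ [a, b]).length = q.length + 2 := by simp
  simp only [PySem.List.pyGet?, PySem.List.pyIdx?, hlen]
  rw [if_neg (by omega), if_pos (by push_cast; omega)]
  have h1 : q.length + 2 - (-(-1 : Int)).toNat = q.length + 1 := by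
    simp
  simp only [Option.bind, h1]
  rw [List.getElem?_append_right (by omega)]
  simp

theorem pvSet_append_pair {α : Type} (ps : List α) (c t x : α) :
    (ps ++ [c, t]).set ((ps ++ [c, t]).length - 2) x = ps ++ [x, t] := by
  have h : (ps ++ [c, t]).length - 2 = ps.length := by simp
  rw [h]
  induction ps with
  | nil => rfl
  | cons p ps' ih => simpa [List.set] using ih

theorem pvJoin_append_pair (ps : List (List Char)) (h : ps ≠ []) (x y : List Char) :
    PySem.Chars.join ['|'] (ps ++ [x, y]) = PySem.Chars.join ['|'] ps ++ '|' :: (x ++ '|' :: y) := by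
  induction ps with
  | nil => simp at h
  | cons p ps' ih =>
    cases ps' with
    | nil =>
      rw [show ([p] ++ [x, y] : List (List Char)) = p :: x :: [y] by simp,
        PySem.Chars.join_cons_cons, PySem.Chars.join_cons_cons,
        PySem.Chars.join_singleton, PySem.Chars.join_singleton]
      simp
    | cons q ps'' =>
      have ih' := ih (by simp)
      simp only [List.cons_append] at ih' ⊢
      rw [PySem.Chars.join_cons_cons, ih', PySem.Chars.join_cons_cons]
      simp

-- ===== VERDICT (by name: the statement is the Claim_ definition above) =====
theorem replace_last_table_cell_spec : Claim_equal_replace_last_table_cell := by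
  intro line value _
  unfold Spec_replace_last_table_cell
  by_cases h3 : line.toList.count '|' < 3
  · have hA : ((((PySem.List.enumerate line.toList 0).filter (fun p => p.2 == '|')).map (fun p => p.1)).length < 3) := by
      have h := pvLength_pipes line.toList 0
      unfold pvPipes at h
      rw [h]; exact h3
    have hB : (PySem.Chars.splitOn line.toList ['|']).length < 4 := by
      rw [pvSplitOn_eq_consume, pvLength_consume]; omega
    simp only [replace_last_table_cell, replace_last_table_cell_alt, if_pos hA, if_pos hB]
  · push_neg at h3
    obtain ⟨u, c, t, hdec, hu, hc, ht⟩ := pvDecomp line.toList h3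
    have hcu : 0 < u.count '|' := List.count_pos_iff.mpr hu
    have hpipes : pvPipes (u ++ '|' :: (c ++ '|' :: t)) 0
        = pvPipes u 0 ++ [(u.length : Int), (u.length : Int) + 1 + (c.length : Int)] := by
      rw [pvPipes_append, pvPipes_cons, pvPipes_append, pvPipes_cons,
        pvPipes_nopipe c hc, pvPipes_nopipe t ht]
      simp
    have hraw : ((PySem.List.enumerate (u ++ '|' :: (c ++ '|' :: t)) 0).filter (fun p => p.2 == '|')).map (fun p => p.1)
        = pvPipes u 0 ++ [(u.length : Int), (u.length : Int) + 1 + (c.length : Int)] := hpipes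
    simp only [replace_last_table_cell, replace_last_table_cell_alt]
    rw [hdec, hraw, pvSplitOn_eq_consume]
    obtain ⟨ps, hps, hpsne⟩ := pvConsume_ends c t hc ht u []
    rw [hps]
    have hlenps : ps.length = u.count '|' + 1 := by
      have h1 := pvLength_consume (u ++ '|' :: (c ++ '|' :: t)) []
      rw [hps] at h1
      simp [List.count_append, List.count_eq_zero.mpr hc, List.count_eq_zero.mpr ht] at h1
      omega
    have hlenA : ¬ ((pvPipes u 0 ++ [(u.length : Int), (u.length : Int) + 1 + (c.length : Int)]).length < 3) := by
      simp [pvLength_pipes]; omega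
    have hlenB : ¬ ((ps ++ [c, t]).length < 4) := by simp; omega
    rw [if_neg hlenA, if_neg hlenB, pvPyGet_pair_neg_two, pvPyGet_pair_neg_one,
      pvPyGet_pair_neg_two]
    simp only [Option.getD_some]
    -- A's slices on the decomposed line
    have hs1 : PySem.List.slice (u ++ '|' :: (c ++ '|' :: t)) none (some ((u.length : Int) + 1)) = u ++ ['|'] := by
      rw [show ((u.length : Int) + 1) = ((u.length + 1 : Nat) : Int) by push_cast; ring,
        PySem.List.slice_to_natCast,
        show u ++ '|' :: (c ++ '|' :: t) = (u ++ ['|']) ++ (c ++ '|' :: t) by simp]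
      exact List.take_left' (by simp)
    have hcell : PySem.List.slice (u ++ '|' :: (c ++ '|' :: t)) (some ((u.length : Int) + 1)) (some ((u.length : Int) + 1 + (c.length : Int))) = c := by
      rw [show ((u.length : Int) + 1 + (c.length : Int)) = ((u.length + 1 + c.length : Nat) : Int) by omega,
        show ((u.length : Int) + 1) = ((u.length + 1 : Nat) : Int) by omega,
        PySem.List.slice_natCast,
        show u ++ '|' :: (c ++ '|' :: t) = (u ++ ['|']) ++ (c ++ ('|' :: t)) by simp,
        List.drop_left' (by simp : (u ++ ['|']).length = u.length + 1),
        show u.length + 1 + c.length - (u.length + 1) = c.length by omega]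
      exact List.take_left' rfl
    have hs3 : PySem.List.slice (u ++ '|' :: (c ++ '|' :: t)) (some ((u.length : Int) + 1 + (c.length : Int))) none = '|' :: t := by
      rw [show ((u.length : Int) + 1 + (c.length : Int)) = ((u.length + 1 + c.length : Nat) : Int) by omega,
        PySem.List.slice_from_natCast,
        show u ++ '|' :: (c ++ '|' :: t) = ((u ++ ['|']) ++ c) ++ '|' :: t by simp]
      exact List.drop_left' (by simp; omega)
    rw [hcell, hs1, hs3]
    -- A's leading/trailing whitespace = B's
    have hd : (c.dropWhile (fun x => x == ' ')).length ≤ c.length := List.length_dropWhile_le _ _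
    have hr : ((c.reverse.dropWhile (fun x => x == ' ')).reverse).length ≤ c.length := by
      simpa using List.length_dropWhile_le (fun x => x == ' ') c.reverse
    have hlead : PySem.List.slice c none (some ((c.length : Int) - ((c.dropWhile (fun x => x == ' ')).length : Int)))
        = c.take (c.length - (c.dropWhile (fun x => x == ' ')).length) := by
      rw [show ((c.length : Int) - ((c.dropWhile (fun x => x == ' ')).length : Int))
          = ((c.length - (c.dropWhile (fun x => x == ' ')).length : Nat) : Int) by omega]
      exact PySem.List.slice_to_natCast _ _
    have htrail : (if ((c.length : Int) - (((c.reverse.dropWhile (fun x => x == ' ')).reverse).length : Int) > 0)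
          then PySem.List.slice c (some ((c.length : Int) - ((c.length : Int) - (((c.reverse.dropWhile (fun x => x == ' ')).reverse).length : Int)))) none
          else [])
        = c.drop (((c.reverse.dropWhile (fun x => x == ' ')).reverse).length) := by
      split_ifs with hpos
      · rw [show ((c.length : Int) - ((c.length : Int) - (((c.reverse.dropWhile (fun x => x == ' ')).reverse).length : Int)))
            = ((((c.reverse.dropWhile (fun x => x == ' ')).reverse).length : Nat) : Int) by push_cast; ring]
        exact PySem.List.slice_from_natCast _ _
      · rw [show ((c.reverse.dropWhile (fun x => x == ' ')).reverse).length = c.length by omega]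
        simp
    rw [hlead, htrail]
    -- B's side: set + join
    have hjoin_all : PySem.Chars.join ['|'] (ps ++ [c, t]) = u ++ '|' :: (c ++ '|' :: t) := by
      rw [← hps]
      simpa using pvJoin_consume (u ++ '|' :: (c ++ '|' :: t)) []
    have hjps : PySem.Chars.join ['|'] ps = u := by
      rw [pvJoin_append_pair ps hpsne] at hjoin_all
      exact List.append_cancel_right hjoin_all
    rw [pvSet_append_pair, pvJoin_append_pair ps hpsne, hjps]
    refine congrArg String.ofList ?_
    simp
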